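-- pv_equiv track=rewrite | github.com/Ka-raS/School-Code | Nam 2 Ky 2 - Lap trinh Python/175. ĐOẠN LIÊN TIẾP NHỎ HƠN.py | lengths
-- ===== SOURCE A (Python) =====
-- from typing import List
--
-- def lengths(array: List[int], length: int) -> List[int]:
--     result = [None] * length
--     indices: List[int] = []
--
--     for i in range(length):
--         while indices and array[indices[-1]] <= array[i]:
--             indices.pop()
--
--         if not indices:
--             result[i] = i + 1
--         else:
--             result[i] = i - indices[-1]
--         indices.append(i)
--
--     return result
-- ===== SOURCE B (Python) =====
-- from typing import List
--
-- def lengths(array: List[int], length: int) -> List[int]: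
--     result: List[int] = []
--     for i in range(length):
--         r = 1
--         while i - r >= 0 and array[i - r] <= array[i]:
--             r += result[i - r]
--         result.append(r)
--     return result
-- ===== Notes on version B (the rewrite author's own statement) =====
-- stated objective: alternative
-- what changed: Replaced the monotonic index stack with the stock-span jump DP: result[i] starts at 1 and repeatedly jumps over already-summarized runs via result[i - result[i]], so no auxiliary indices list is kept.
import Mathlib
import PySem

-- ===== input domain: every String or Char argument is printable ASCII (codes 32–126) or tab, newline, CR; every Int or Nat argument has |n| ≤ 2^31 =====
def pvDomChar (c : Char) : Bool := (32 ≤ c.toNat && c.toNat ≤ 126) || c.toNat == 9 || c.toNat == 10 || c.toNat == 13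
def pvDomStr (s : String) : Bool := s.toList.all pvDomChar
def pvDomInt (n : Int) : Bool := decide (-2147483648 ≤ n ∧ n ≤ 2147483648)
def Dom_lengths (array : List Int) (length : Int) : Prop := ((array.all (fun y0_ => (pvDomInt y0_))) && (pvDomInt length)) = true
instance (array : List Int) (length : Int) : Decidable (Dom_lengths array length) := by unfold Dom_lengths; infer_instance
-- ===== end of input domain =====

-- B replaces A's monotonic index stack by the stock-span jump DP (result[i-result[i]] jumps); same result, similar cost.

-- ===== PORT A =====
-- A's `while indices and array[indices[-1]] <= array[i]: indices.pop()`.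
-- The stack is stored with its TOP (= Python indices[-1]) at the HEAD of the list.
def popLE (array : List Int) (ai : Int) : List Int → List Int
  | [] => []
  | j :: rest =>
    if PySem.List.pyGetD array j 0 ≤ ai then popLE array ai rest else j :: rest

-- Python writes result[i] for i = 0..length-1 in order; the port appends in the same order.
def lengths (array : List Int) (length : Int) : List Int :=
  ((PySem.List.pyRange 0 length 1).foldl
    (fun (st : List Int × List Int) i =>
      let popped := popLE array (PySem.List.pyGetD array i 0) st.2
      let v := match popped with
        | [] => i + 1
        | j :: _ => i - j
      (st.1 ++ [v], i :: popped))
    ([], [])).1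

-- ===== PORT B =====
-- Source B's `while i - r >= 0 and array[i - r] <= array[i]: r += result[i - r]`; the fuel
-- (i.toNat + 1 at the call site) only makes the loop total — it never fires on admitted runs,
-- since each iteration increases r by result[i-r] ≥ 1 and the loop needs r ≤ i.
def jumpB (array res : List Int) (i : Int) : Nat → Int → Int
  | 0, r => r
  | fuel + 1, r =>
    if 0 ≤ i - r ∧ PySem.List.pyGetD array (i - r) 0 ≤ PySem.List.pyGetD array i 0 then
      jumpB array res i fuel (r + PySem.List.pyGetD res (i - r) 0)
    else r

def lengths_alt (array : List Int) (length : Int) : List Int :=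
  (PySem.List.pyRange 0 length 1).foldl
    (fun (res : List Int) i => res ++ [jumpB array res i (i.toNat + 1) 1])
    []

-- ===== PRECONDITION & SPEC =====
-- Pre_ excludes exactly the inputs where Python A raises IndexError (array[i] with i ≥ len(array));
-- for length ≤ 1 on an empty array the while-guard short-circuits and A still returns, so that stays inside.
def Pre_lengths (array : List Int) (length : Int) : Prop :=
  length ≤ (array.length : Int) ∨ (array = [] ∧ length ≤ 1)
instance (array : List Int) (length : Int) : Decidable (Pre_lengths array length) := by
  unfold Pre_lengths; infer_instance
def pvWitness_lengths : List Int × Int := ([3, 1, 2, 2, 5], 5)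

def Spec_lengths (array : List Int) (length : Int) (out : List Int) : Prop := out = lengths_alt array length
instance (array : List Int) (length : Int) (out : List Int) : Decidable (Spec_lengths array length out) := by unfold Spec_lengths; infer_instance

-- ===== CLAIM (what is proved, stated in full; the proofs are below) =====
def Claim_equal_lengths : Prop := ∀ (array : List Int) (length : Int), Dom_lengths array length → Pre_lengths array length → Spec_lengths array length (lengths array length)

-- ===== LEMMAS AND PROOFS =====

-- `JChain res st k` : st is exactly the jump chain of res starting at k,
-- every element nonnegative, strictly decreasing, ending exactly at -1.
def JChain (res : List Int) : List Int → Int → Prop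
  | [], k => k = -1
  | j :: rest, k =>
      j = k ∧ 0 ≤ j ∧ j - PySem.List.pyGetD res j 0 < j ∧
        JChain res rest (j - PySem.List.pyGetD res j 0)

-- proof-side helpers: named step functions equal (definitionally) to the ports' fold bodies
def stepA (array : List Int) (st : List Int × List Int) (i : Int) : List Int × List Int :=
  let popped := popLE array (PySem.List.pyGetD array i 0) st.2
  let v := match popped with
    | [] => i + 1
    | j :: _ => i - j
  (st.1 ++ [v], i :: popped)

def stepB (array : List Int) (res : List Int) (i : Int) : List Int :=
  res ++ [jumpB array res i (i.toNat + 1) 1]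

lemma lengths_eq_fold (array : List Int) (length : Int) :
    lengths array length = ((PySem.List.pyRange 0 length 1).foldl (stepA array) ([], [])).1 := rfl

lemma lengths_alt_eq_fold (array : List Int) (length : Int) :
    lengths_alt array length = (PySem.List.pyRange 0 length 1).foldl (stepB array) [] := rfl

lemma chain_mem (res : List Int) : ∀ (st : List Int) (k : Int), JChain res st k →
    ∀ j ∈ st, 0 ≤ j ∧ j ≤ k := by
  intro st
  induction st with
  | nil => intro k _ j hj; cases hj
  | cons a rest ih =>
      intro k h j hj
      obtain ⟨hak, ha0, hlt, hrest⟩ := h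
      rcases List.mem_cons.mp hj with rfl | hj
      · exact ⟨ha0, by omega⟩
      · have := ih _ hrest j hj
        omega

lemma chain_len (res : List Int) : ∀ (st : List Int) (k : Int), JChain res st k →
    (st.length : Int) ≤ k + 1 := by
  intro st
  induction st with
  | nil =>
      intro k h
      have hk : k = -1 := h
      simp
      omega
  | cons a rest ih =>
      intro k h
      obtain ⟨hak, ha0, hlt, hrest⟩ := h
      have := ih _ hrest
      simp only [List.length_cons]
      push_cast
      omega

lemma popLE_subset (array : List Int) (ai : Int) : ∀ (st : List Int),
    ∀ j ∈ popLE array ai st, j ∈ st := by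
  intro st
  induction st with
  | nil => intro j hj; simp [popLE] at hj
  | cons a rest ih =>
      intro j hj
      by_cases hc : PySem.List.pyGetD array a 0 ≤ ai
      · simp only [popLE, if_pos hc] at hj
        exact List.mem_cons_of_mem _ (ih j hj)
      · simpa [popLE, if_neg hc] using hj

lemma pyGetD_append_lt (res vs : List Int) (j : Int) (h0 : 0 ≤ j) (h1 : j < (res.length : Int)) :
    PySem.List.pyGetD (res ++ vs) j 0 = PySem.List.pyGetD res j 0 := by
  rw [PySem.List.pyGetD_eq_getElem (res ++ vs) 0 h0 (by simp; omega),
      PySem.List.pyGetD_eq_getElem res 0 h0 h1]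
  exact List.getElem_append_left (by omega)

lemma pyGetD_concat (res : List Int) (v : Int) :
    PySem.List.pyGetD (res ++ [v]) ((res.length : Nat) : Int) 0 = v := by
  rw [PySem.List.pyGetD_eq_getElem (res ++ [v]) 0 (by positivity) (by simp)]
  simp

lemma chain_append (res vs : List Int) : ∀ (st : List Int) (k : Int),
    k < (res.length : Int) → JChain res st k → JChain (res ++ vs) st k := by
  intro st
  induction st with
  | nil => intro k _ h; exact h
  | cons a rest ih =>
      intro k hk h
      obtain ⟨hak, ha0, hlt, hrest⟩ := h
      have hget : PySem.List.pyGetD (res ++ vs) a 0 = PySem.List.pyGetD res a 0 :=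
        pyGetD_append_lt res vs a ha0 (by omega)
      exact ⟨hak, ha0, by rw [hget]; exact hlt, by rw [hget]; exact ih _ (by omega) hrest⟩

lemma pop_chain (array res : List Int) (ai : Int) : ∀ (st : List Int) (k : Int),
    JChain res st k →
    JChain res (popLE array ai st) ((popLE array ai st).headD (-1)) := by
  intro st
  induction st with
  | nil => intro k _; simp [popLE, JChain]
  | cons a rest ih =>
      intro k h
      obtain ⟨hak, ha0, hlt, hrest⟩ := h
      by_cases hc : PySem.List.pyGetD array a 0 ≤ ai
      · simp only [popLE, if_pos hc]
        exact ih _ hrest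
      · simp only [popLE, if_neg hc, List.headD_cons]
        exact ⟨rfl, ha0, hlt, hrest⟩

lemma jump_pop (array res : List Int) (i : Int) : ∀ (st : List Int) (k r : Int) (fuel : Nat),
    JChain res st k → i - r = k → st.length < fuel →
    jumpB array res i fuel r =
      (match popLE array (PySem.List.pyGetD array i 0) st with
        | [] => i + 1
        | j :: _ => i - j) := by
  intro st
  induction st with
  | nil =>
      intro k r fuel h hr hf
      have hk : k = -1 := h
      obtain ⟨f, rfl⟩ : ∃ f, fuel = f + 1 := ⟨fuel - 1, by omega⟩
      simp only [jumpB, popLE]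
      rw [if_neg (by rintro ⟨h1, -⟩; omega)]
      change r = i + 1
      omega
  | cons a rest ih =>
      intro k r fuel h hr hf
      obtain ⟨hak, ha0, hlt, hrest⟩ := h
      obtain ⟨f, rfl⟩ : ∃ f, fuel = f + 1 := ⟨fuel - 1, by omega⟩
      have hir : i - r = a := by omega
      by_cases hc : PySem.List.pyGetD array a 0 ≤ PySem.List.pyGetD array i 0
      · simp only [jumpB, popLE, if_pos hc]
        rw [if_pos ⟨by omega, by rw [hir]; exact hc⟩, hir]
        exact ih (a - PySem.List.pyGetD res a 0) _ f hrest (by omega)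
          (by simp only [List.length_cons] at hf; omega)
      · simp only [jumpB, popLE, if_neg hc]
        rw [if_neg (by rintro ⟨-, h2⟩; rw [hir] at h2; exact hc h2)]
        change r = i - a
        omega

lemma main_inv (array : List Int) : ∀ (m : Nat),
    ((PySem.List.pyRange 0 (m : Int) 1).foldl (stepA array) ([], [])).1 =
      (PySem.List.pyRange 0 (m : Int) 1).foldl (stepB array) [] ∧
    ((PySem.List.pyRange 0 (m : Int) 1).foldl (stepB array) []).length = m ∧
    JChain ((PySem.List.pyRange 0 (m : Int) 1).foldl (stepB array) [])
      ((PySem.List.pyRange 0 (m : Int) 1).foldl (stepA array) ([], [])).2 ((m : Int) - 1) := by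
  intro m
  induction m with
  | zero => simp [PySem.List.pyRange_one_eq_nil, JChain]
  | succ m ih =>
      obtain ⟨ihres, ihlen, ihchain⟩ := ih
      have hsplit : PySem.List.pyRange 0 ((m + 1 : Nat) : Int) 1 =
          PySem.List.pyRange 0 (m : Int) 1 ++ [(m : Int)] := by
        push_cast
        exact PySem.List.pyRange_one_succ_right (by positivity)
      simp only [hsplit, List.foldl_append, List.foldl_cons, List.foldl_nil]
      set res := (PySem.List.pyRange 0 (m : Int) 1).foldl (stepB array) [] with hres
      set stA := (PySem.List.pyRange 0 (m : Int) 1).foldl (stepA array) ([], []) with hstA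
      have hfuel : stA.2.length < (m : Int).toNat + 1 := by
        have h1 := chain_len res stA.2 ((m : Int) - 1) ihchain
        have h2 : (m : Int).toNat = m := Int.toNat_natCast m
        omega
      have hjump := jump_pop array res (m : Int) stA.2 ((m : Int) - 1) 1
        ((m : Int).toNat + 1) ihchain (by ring) hfuel
      have hm1 : ((m + 1 : Nat) : Int) - 1 = (m : Int) := by push_cast; ring
      cases hp : popLE array (PySem.List.pyGetD array (m : Int) 0) stA.2 with
      | nil =>
          have hv : jumpB array res (m : Int) ((m : Int).toNat + 1) 1 = (m : Int) + 1 := by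
            rw [hjump, hp]
          have hget : PySem.List.pyGetD (res ++ [(m : Int) + 1]) (m : Int) 0 = (m : Int) + 1 := by
            rw [show ((m : Nat) : Int) = ((res.length : Nat) : Int) by rw [ihlen], pyGetD_concat]
          refine ⟨?_, ?_, ?_⟩
          · simp only [stepA, stepB, hv, hp, ihres]
          · simp [stepB, ihlen]
          · simp only [stepA, stepB, hv, hp, hm1]
            refine ⟨rfl, by positivity, by rw [hget]; omega, ?_⟩
            show (m : Int) - PySem.List.pyGetD (res ++ [(m : Int) + 1]) (m : Int) 0 = -1
            rw [hget]
            omega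
      | cons j rest =>
          have hv : jumpB array res (m : Int) ((m : Int).toNat + 1) 1 = (m : Int) - j := by
            rw [hjump, hp]
          have hj_mem : j ∈ stA.2 :=
            popLE_subset array _ stA.2 j (by rw [hp]; exact List.mem_cons_self)
          obtain ⟨hj0, hjle⟩ := chain_mem res stA.2 ((m : Int) - 1) ihchain j hj_mem
          have hchain' := pop_chain array res (PySem.List.pyGetD array (m : Int) 0) stA.2
            ((m : Int) - 1) ihchain
          rw [hp] at hchain'
          simp only [List.headD_cons] at hchain'
          have happ : JChain (res ++ [(m : Int) - j]) (j :: rest) j :=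
            chain_append res [(m : Int) - j] (j :: rest) j (by omega) hchain'
          have hget : PySem.List.pyGetD (res ++ [(m : Int) - j]) (m : Int) 0 = (m : Int) - j := by
            rw [show ((m : Nat) : Int) = ((res.length : Nat) : Int) by rw [ihlen], pyGetD_concat]
          refine ⟨?_, ?_, ?_⟩
          · simp only [stepA, stepB, hv, hp, ihres]
          · simp [stepB, ihlen]
          · simp only [stepA, stepB, hv, hp, hm1]
            refine ⟨rfl, by positivity, by rw [hget]; omega, ?_⟩
            show JChain (res ++ [(m : Int) - j]) (j :: rest)
              ((m : Int) - PySem.List.pyGetD (res ++ [(m : Int) - j]) (m : Int) 0)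
            rw [hget, show (m : Int) - ((m : Int) - j) = j by ring]
            exact happ

-- ===== VERDICT (by name: the statement is the Claim_ definition above) =====
theorem lengths_spec : Claim_equal_lengths := by
  intro array length _ _
  unfold Spec_lengths
  rw [lengths_eq_fold, lengths_alt_eq_fold]
  by_cases h : length ≤ 0
  · rw [PySem.List.pyRange_one_eq_nil h]
    rfl
  · have hcast : ((length.toNat : Nat) : Int) = length := by omega
    rw [← hcast]
    exact (main_inv array length.toNat).1
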